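-- pv_equiv track=rewrite | github.com/DuHao10086/multi_task_calcification | baseline/baseline_utils.py | RescaleImage
-- ===== SOURCE A (Python) =====
-- def RescaleImage(shape, coord, R=3, C=3, size=224):
--     h, w = shape
--     step = max(h//R, w//R)
--     imglist = [coord]
--     deltax = (step * R - w)//3
--     deltay = (step * C - h)//3
--     tempx = coord[2]
--     for i in range(C):
--         nextx = tempx + step - deltax
--         if nextx > coord[3]:
--             nextx = coord[3]
--         tempy = coord[0]
--         for j in range(R):
--             nexty = tempy + step - deltay
--             if nexty > coord[1]:
--                 nexty = coord[1]
--             imglist.append([tempy, nexty, tempx, nextx])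
--             tempy = nexty
--         tempx = nextx
--     return imglist
-- ===== SOURCE B (Python) =====
-- def RescaleImage(shape, coord, R=3, C=3, size=224):
--     h, w = shape
--     step = max(h // R, w // R)
--     deltax = (step * R - w) // 3
--     deltay = (step * C - h) // 3
--     # prepass 1: horizontal (x) boundary pairs
--     xs = []
--     tx = coord[2]
--     for _ in range(C):
--         nx = min(tx + step - deltax, coord[3])
--         xs.append((tx, nx))
--         tx = nx
--     if not xs:          # no columns: nothing beyond the original coord
--         return [coord]
--     # prepass 2: vertical (y) boundary pairs, same for every column
--     ys = []
--     ty = coord[0]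
--     for _ in range(R):
--         ny = min(ty + step - deltay, coord[1])
--         ys.append((ty, ny))
--         ty = ny
--     # product pass, x outer / y inner to match the emission order
--     return [coord] + [[ty, ny, tx, nx] for (tx, nx) in xs for (ty, ny) in ys]
-- ===== Notes on version B (the rewrite author's own statement) =====
-- stated objective: alternative
-- what changed: Replaces A's single nested loop with intertwined x/y state by two independent boundary prepasses (ys and xs lists of clamped (start,end) pairs) followed by a cartesian-product pass that emits the grid rows.
import Mathlib
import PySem

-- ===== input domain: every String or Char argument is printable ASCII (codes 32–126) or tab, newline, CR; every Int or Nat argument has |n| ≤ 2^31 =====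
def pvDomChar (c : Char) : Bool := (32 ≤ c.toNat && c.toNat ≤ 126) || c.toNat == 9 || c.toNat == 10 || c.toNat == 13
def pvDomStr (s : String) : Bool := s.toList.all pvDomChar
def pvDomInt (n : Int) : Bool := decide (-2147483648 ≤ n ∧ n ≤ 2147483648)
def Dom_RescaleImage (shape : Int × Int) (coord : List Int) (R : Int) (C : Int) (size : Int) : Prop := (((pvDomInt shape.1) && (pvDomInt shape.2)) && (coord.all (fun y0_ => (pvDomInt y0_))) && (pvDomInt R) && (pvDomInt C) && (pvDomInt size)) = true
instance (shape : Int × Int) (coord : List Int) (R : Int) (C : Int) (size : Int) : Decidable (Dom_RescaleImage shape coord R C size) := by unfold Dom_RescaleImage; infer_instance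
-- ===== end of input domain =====

-- B replaces A's intertwined nested loop with two independent boundary prepasses and a product pass (objective: alternative decomposition; same output).

-- ===== PORT A =====
-- literal port of A's fused nested loop; the folds carry (imglist, temp) state exactly as the Python does
def RescaleImage (shape : Int × Int) (coord : List Int) (R : Int) (C : Int) (size : Int) : List (List Int) :=
  let h := shape.1
  let w := shape.2
  let step := max (PySem.Int.floordiv h R) (PySem.Int.floordiv w R)
  let imglist : List (List Int) := [coord]
  let deltax := PySem.Int.floordiv (step * R - w) 3
  let deltay := PySem.Int.floordiv (step * C - h) 3
  let tempx := PySem.List.pyGetD coord 2 0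
  let res := (PySem.List.pyRange 0 C 1).foldl (fun (s : List (List Int) × Int) _ =>
    let tempx := s.2
    let nextx0 := tempx + step - deltax
    let nextx := if nextx0 > PySem.List.pyGetD coord 3 0 then PySem.List.pyGetD coord 3 0 else nextx0
    let inner := (PySem.List.pyRange 0 R 1).foldl (fun (t : List (List Int) × Int) _ =>
      let tempy := t.2
      let nexty0 := tempy + step - deltay
      let nexty := if nexty0 > PySem.List.pyGetD coord 1 0 then PySem.List.pyGetD coord 1 0 else nexty0
      (t.1 ++ [[tempy, nexty, tempx, nextx]], nexty)) (s.1, PySem.List.pyGetD coord 0 0)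
    (inner.1, nextx)) (imglist, tempx)
  res.1

-- ===== PORT B =====
-- boundary prepass: append n clamped (start, end) pairs to acc, starting at t, increment inc, upper clamp lim (tail-recursive, like Source B's append loop)
def pvBounds (inc lim : Int) : Nat → Int → List (Int × Int) → List (Int × Int)
  | 0, _, acc => acc.reverse
  | n+1, t, acc =>
    let nx := min (t + inc) lim
    pvBounds inc lim n nx ((t, nx) :: acc)

def RescaleImage_alt (shape : Int × Int) (coord : List Int) (R : Int) (C : Int) (size : Int) : List (List Int) :=
  let h := shape.1
  let w := shape.2
  let step := max (PySem.Int.floordiv h R) (PySem.Int.floordiv w R)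
  let deltax := PySem.Int.floordiv (step * R - w) 3
  let deltay := PySem.Int.floordiv (step * C - h) 3
  let xs := pvBounds (step - deltax) (PySem.List.pyGetD coord 3 0) C.toNat (PySem.List.pyGetD coord 2 0) []
  if xs.isEmpty then [coord]
  else
    let ys := pvBounds (step - deltay) (PySem.List.pyGetD coord 1 0) R.toNat (PySem.List.pyGetD coord 0 0) []
    coord :: xs.flatMap (fun x => ys.map (fun y => [y.1, y.2, x.1, x.2]))

-- ===== PRECONDITION & SPEC =====
-- Pre_ excludes exactly the inputs where Python A raises: R = 0 (ZeroDivisionError in h//R), or an IndexError on coord: coord[2] always needs length ≥ 3, and coord[3] (read only when the outer loop runs, i.e. C > 0) needs length ≥ 4.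
def Pre_RescaleImage (shape : Int × Int) (coord : List Int) (R : Int) (C : Int) (size : Int) : Prop :=
  R ≠ 0 ∧ 3 ≤ coord.length ∧ (4 ≤ coord.length ∨ C ≤ 0)
instance (shape : Int × Int) (coord : List Int) (R : Int) (C : Int) (size : Int) : Decidable (Pre_RescaleImage shape coord R C size) := by unfold Pre_RescaleImage; infer_instance

def pvWitness_RescaleImage : (Int × Int) × List Int × Int × Int × Int := ((224, 224), [0, 224, 0, 224], 3, 3, 224)

def Spec_RescaleImage (shape : Int × Int) (coord : List Int) (R : Int) (C : Int) (size : Int) (out : List (List Int)) : Prop := out = RescaleImage_alt shape coord R C size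
instance (shape : Int × Int) (coord : List Int) (R : Int) (C : Int) (size : Int) (out : List (List Int)) : Decidable (Spec_RescaleImage shape coord R C size out) := by unfold Spec_RescaleImage; infer_instance

-- ===== CLAIM (what is proved, stated in full; the proofs are below) =====
def Claim_equal_RescaleImage : Prop := ∀ (shape : Int × Int) (coord : List Int) (R : Int) (C : Int) (size : Int), Dom_RescaleImage shape coord R C size → Pre_RescaleImage shape coord R C size → Spec_RescaleImage shape coord R C size (RescaleImage shape coord R C size)

-- ===== LEMMAS AND PROOFS =====

-- structural version of the boundary prepass, for the induction
def pvBoundsS (inc lim : Int) : Nat → Int → List (Int × Int)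
  | 0, _ => []
  | n+1, t =>
    let nx := min (t + inc) lim
    (t, nx) :: pvBoundsS inc lim n nx

theorem pvBounds_eq (inc lim : Int) : ∀ (n : Nat) (t : Int) (acc : List (Int × Int)),
    pvBounds inc lim n t acc = acc.reverse ++ pvBoundsS inc lim n t := by
  intro n
  induction n with
  | zero => intro t acc; simp [pvBounds, pvBoundsS]
  | succ m ih => intro t acc; simp [pvBounds, pvBoundsS, ih, List.append_assoc]


-- A's clamp (if > lim then lim else _) equals B's min
theorem pvClampEq (a lim : Int) : (if a > lim then lim else a) = min a lim := by
  rw [min_def]; split_ifs <;> omega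

-- the final state of a pvBoundsS chain
def pvEnd (inc lim : Int) : Nat → Int → Int
  | 0, t => t
  | n+1, t => pvEnd inc lim n (min (t + inc) lim)

-- A's inner loop over any index list equals appending the mapped ys boundary list
theorem pvInner (inc lim : Int) (f : Int × Int → List Int) :
    ∀ (l : List Int) (acc : List (List Int)) (t : Int),
      l.foldl (fun (s : List (List Int) × Int) _ =>
        let ny := if s.2 + inc > lim then lim else s.2 + inc
        (s.1 ++ [f (s.2, ny)], ny)) (acc, t)
      = (acc ++ (pvBoundsS inc lim l.length t).map f, pvEnd inc lim l.length t) := by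
  intro l
  induction l with
  | nil => intro acc t; simp [pvBoundsS, pvEnd]
  | cons x xs ih =>
    intro acc t
    simp only [List.foldl_cons, List.length_cons]
    rw [show (if t + inc > lim then lim else t + inc) = min (t + inc) lim from pvClampEq _ _]
    rw [ih]
    simp [pvBoundsS, pvEnd, List.append_assoc]

-- A's full nested loop over any pair of index lists equals [coord-prefix] ++ product of the two boundary prepasses
theorem pvNested (incx limx incy limy y0 : Int) (yl : List Int) :
    ∀ (l : List Int) (acc : List (List Int)) (tx : Int),
      l.foldl (fun (s : List (List Int) × Int) _ =>
        let nx := if s.2 + incx > limx then limx else s.2 + incx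
        let inner := yl.foldl (fun (t : List (List Int) × Int) _ =>
            let ny := if t.2 + incy > limy then limy else t.2 + incy
            (t.1 ++ [[t.2, ny, s.2, nx]], ny)) (s.1, y0)
        (inner.1, nx)) (acc, tx)
      = (acc ++ (pvBoundsS incx limx l.length tx).flatMap
           (fun x => (pvBoundsS incy limy yl.length y0).map (fun y => [y.1, y.2, x.1, x.2])),
         pvEnd incx limx l.length tx) := by
  intro l
  induction l with
  | nil => intro acc tx; simp [pvBoundsS, pvEnd]
  | cons x xs ih =>
    intro acc tx
    simp only [List.foldl_cons, List.length_cons]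
    rw [pvInner incy limy
      (fun y => [y.1, y.2, tx, if tx + incx > limx then limx else tx + incx]) yl acc y0]
    rw [ih]
    rw [show (if tx + incx > limx then limx else tx + incx) = min (tx + incx) limx from pvClampEq _ _]
    simp [pvBoundsS, pvEnd, List.append_assoc]

-- ===== VERDICT (by name: the statement is the Claim_ definition above) =====
theorem RescaleImage_spec : Claim_equal_RescaleImage := by
  intro shape coord R C size _ _
  unfold Spec_RescaleImage RescaleImage RescaleImage_alt
  by_cases hC : C ≤ 0
  · simp [PySem.List.pyRange_one_eq_nil hC, Int.toNat_of_nonpos hC, pvBounds]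
  · obtain ⟨k, hk⟩ : ∃ k, C.toNat = k + 1 := ⟨C.toNat - 1, by omega⟩
    simp only [add_sub_assoc]
    rw [pvNested]
    simp [PySem.List.length_pyRange_one, pvBounds_eq, hk, pvBoundsS]
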